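-- pv_equiv track=rewrite | github.com/DrSeil/mssb-dtk | tools/langgraph_decomp/nodes.py | _split_m2c_draft
-- ===== SOURCE A (Python) =====
-- def _split_m2c_draft(c_code, func_name):
--     """Split M2C output into externs, headers, and body."""
--     externs = []
--     unit_headers = []
--     function_body = []
--
--     lines = c_code.splitlines()
--     in_function = False
--
--     for line in lines:
--         stripped = line.strip()
--         if stripped.startswith('#'):
--             continue
--
--         if not stripped:
--             if in_function:
--                 function_body.append(line)
--             continue
--
--         # Detect function start
--         if func_name in line and '{' in line and '(' in line:
--             in_function = True
--
--         if in_function: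
--             function_body.append(line)
--         else:
--             if stripped.startswith('?') or '/* extern */' in line:
--                 externs.append(line)
--             elif (stripped.startswith('extern') or stripped.startswith('static')
--                   or stripped.startswith('typedef')):
--                 unit_headers.append(line)
--             else:
--                 if stripped.endswith(';') and '(' in stripped:
--                     unit_headers.append(line)
--                 else:
--                     externs.append(line)
--
--     return {
--         "externs": "\n".join(externs),
--         "headers": "\n".join(unit_headers),
--         "body": "\n".join(function_body),
--     }
-- ===== SOURCE B (Python) =====
-- def _split_m2c_draft(c_code, func_name):
--     """Split M2C output into externs, headers, and body (two-phase: locate the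
--     function start first, then classify only the prefix)."""
--     lines = c_code.splitlines()
--     i = next((k for k, line in enumerate(lines)
--               if not line.strip().startswith('#')
--               and func_name in line and '{' in line and '(' in line),
--              len(lines))
--     body = [line for line in lines[i:] if not line.strip().startswith('#')]
--     externs = []
--     headers = []
--     for line in lines[:i]:
--         s = line.strip()
--         if not s or s.startswith('#'):
--             continue
--         if s.startswith('?') or '/* extern */' in line:
--             externs.append(line)
--         elif s.startswith(('extern', 'static', 'typedef')):
--             headers.append(line)
--         elif s.endswith(';') and '(' in s:
--             headers.append(line)
--         else:
--             externs.append(line)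
--     return {
--         "externs": "\n".join(externs),
--         "headers": "\n".join(headers),
--         "body": "\n".join(body),
--     }
-- ===== Notes on version B (the rewrite author's own statement) =====
-- stated objective: simpler
-- what changed: Replaced A's single stateful scan with an in_function flag by a two-phase decomposition: first find the index of the function-start line, then build the body by filtering the suffix and classify only the prefix lines.
import Mathlib
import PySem

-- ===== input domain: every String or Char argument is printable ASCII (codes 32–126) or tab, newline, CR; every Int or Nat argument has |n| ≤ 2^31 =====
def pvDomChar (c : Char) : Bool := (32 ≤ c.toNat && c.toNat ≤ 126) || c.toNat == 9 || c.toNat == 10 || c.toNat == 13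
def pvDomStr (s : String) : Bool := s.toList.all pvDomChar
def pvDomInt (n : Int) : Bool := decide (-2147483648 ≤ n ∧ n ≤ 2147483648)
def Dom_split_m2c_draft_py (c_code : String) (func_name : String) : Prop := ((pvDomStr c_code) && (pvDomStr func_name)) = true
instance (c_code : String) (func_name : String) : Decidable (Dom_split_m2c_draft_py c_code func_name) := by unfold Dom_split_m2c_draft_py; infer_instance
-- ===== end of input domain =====

-- B re-decomposes A's single stateful scan into two passes: first locate the function-start
-- line, then build the body from the suffix and classify only the prefix (objective: simpler).

-- ===== PORT A =====
-- state: (externs, unit_headers, function_body, in_function)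
def pvStepA (func_name : String)
    (st : List String × List String × List String × Bool) (line : String) :
    List String × List String × List String × Bool :=
  let stripped := PySem.Str.strip line
  if PySem.Str.startswith stripped "#" then st
  else if stripped = "" then
    (if st.2.2.2 then (st.1, st.2.1, st.2.2.1 ++ [line], st.2.2.2) else st)
  else
    let inf := (PySem.Str.isIn func_name line && PySem.Str.isIn "{" line
                  && PySem.Str.isIn "(" line) || st.2.2.2
    if inf then (st.1, st.2.1, st.2.2.1 ++ [line], inf)
    else if PySem.Str.startswith stripped "?" || PySem.Str.isIn "/* extern */" line then
      (st.1 ++ [line], st.2.1, st.2.2.1, inf)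
    else if PySem.Str.startswith stripped "extern" || PySem.Str.startswith stripped "static"
        || PySem.Str.startswith stripped "typedef" then
      (st.1, st.2.1 ++ [line], st.2.2.1, inf)
    else if PySem.Str.endswith stripped ";" && PySem.Str.isIn "(" stripped then
      (st.1, st.2.1 ++ [line], st.2.2.1, inf)
    else (st.1 ++ [line], st.2.1, st.2.2.1, inf)

def split_m2c_draft_py (c_code : String) (func_name : String) : List (String × String) :=
  let lines := PySem.Str.splitlines c_code
  let st := lines.foldl (pvStepA func_name) ([], [], [], false)
  [("externs", PySem.Str.join "\n" st.1),
   ("headers", PySem.Str.join "\n" st.2.1),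
   ("body", PySem.Str.join "\n" st.2.2.1)]

-- ===== PORT B =====
-- the function-start predicate of B's `next(...)` scan
def pvPredB (func_name : String) (line : String) : Bool :=
  !(PySem.Str.startswith (PySem.Str.strip line) "#")
    && PySem.Str.isIn func_name line && PySem.Str.isIn "{" line && PySem.Str.isIn "(" line

-- classification of one prefix line (state: (externs, headers))
def pvClsB (st : List String × List String) (line : String) : List String × List String :=
  let s := PySem.Str.strip line
  if s = "" || PySem.Str.startswith s "#" then st
  else if PySem.Str.startswith s "?" || PySem.Str.isIn "/* extern */" line then
    (st.1 ++ [line], st.2)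
  else if PySem.Str.startswith s "extern" || PySem.Str.startswith s "static"
      || PySem.Str.startswith s "typedef" then
    (st.1, st.2 ++ [line])
  else if PySem.Str.endswith s ";" && PySem.Str.isIn "(" s then
    (st.1, st.2 ++ [line])
  else (st.1 ++ [line], st.2)

def split_m2c_draft_py_alt (c_code : String) (func_name : String) : List (String × String) :=
  let lines := PySem.Str.splitlines c_code
  let i := lines.findIdx (pvPredB func_name)   -- next(..., len(lines))
  let body := (lines.drop i).filter (fun l => !(PySem.Str.startswith (PySem.Str.strip l) "#"))
  let p := (lines.take i).foldl pvClsB ([], [])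
  [("externs", PySem.Str.join "\n" p.1),
   ("headers", PySem.Str.join "\n" p.2),
   ("body", PySem.Str.join "\n" body)]

-- ===== PRECONDITION & SPEC =====
def Spec_split_m2c_draft_py (c_code : String) (func_name : String) (out : List (String × String)) : Prop := out = split_m2c_draft_py_alt c_code func_name
instance (c_code : String) (func_name : String) (out : List (String × String)) : Decidable (Spec_split_m2c_draft_py c_code func_name out) := by unfold Spec_split_m2c_draft_py; infer_instance

-- ===== CLAIM (what is proved, stated in full; the proofs are below) =====
def Claim_equal_split_m2c_draft_py : Prop := ∀ (c_code : String) (func_name : String), Dom_split_m2c_draft_py c_code func_name → Spec_split_m2c_draft_py c_code func_name (split_m2c_draft_py c_code func_name)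

-- ===== LEMMAS AND PROOFS =====

lemma mem_dropWhile_of_mem {α : Type} {p : α → Bool} {a : α} (h : p a = false) :
    ∀ {l : List α}, a ∈ l → a ∈ l.dropWhile p := by
  intro l
  induction l with
  | nil => simp
  | cons x xs ih =>
    intro hm
    by_cases hp : p x = true
    · simp [List.dropWhile, hp]
      rcases List.mem_cons.mp hm with rfl | hm'
      · simp [hp] at h
      · exact ih hm'
    · simp at hp
      simpa [List.dropWhile, hp] using hm

-- a line containing '(' does not strip to the empty string
lemma strip_ne_empty_of_paren {l : String} (h : PySem.Str.isIn "(" l = true) :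
    ¬ (PySem.Str.strip l = "") := by
  intro he
  have hmem : '(' ∈ l.toList := by
    have := (PySem.Str.isIn_iff_infix _ _).mp h
    rcases this with ⟨s, t, hst⟩
    have : '(' ∈ s ++ "(".toList ++ t := by simp
    rw [hst] at this
    exact this
  have h1 : '(' ∈ PySem.Chars.lstrip l.toList :=
    mem_dropWhile_of_mem (by decide) hmem
  have h2 : '(' ∈ PySem.Chars.strip l.toList := by
    unfold PySem.Chars.strip PySem.Chars.rstrip
    rw [List.mem_reverse]
    exact mem_dropWhile_of_mem (by decide) (by rwa [List.mem_reverse])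
  have hnil : PySem.Chars.strip l.toList = [] := by
    have := congrArg String.toList he
    rwa [PySem.Str.toList_strip] at this
  rw [hnil] at h2
  exact absurd h2 (by simp)

-- once in_function, every remaining non-'#' line goes to the body
lemma loopA_true (fn : String) :
    ∀ (lines : List String) (ex hd bd : List String),
      lines.foldl (pvStepA fn) (ex, hd, bd, true) =
        (ex, hd, bd ++ lines.filter (fun l => !(PySem.Str.startswith (PySem.Str.strip l) "#")), true) := by
  intro lines
  induction lines with
  | nil => intro ex hd bd; simp
  | cons l rest ih =>
    intro ex hd bd
    rw [List.foldl_cons, List.filter_cons]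
    by_cases hc : PySem.Str.startswith (PySem.Str.strip l) "#" = true
    · have h1 : pvStepA fn (ex, hd, bd, true) l = (ex, hd, bd, true) := by
        simp only [pvStepA, hc, if_true]
      rw [h1, ih]
      simp only [hc, Bool.not_true, Bool.false_eq_true, if_false]
    · simp only [Bool.not_eq_true] at hc
      have hkeep : (!PySem.Str.startswith (PySem.Str.strip l) "#") = true := by
        rw [hc]; rfl
      have h1 : pvStepA fn (ex, hd, bd, true) l = (ex, hd, bd ++ [l], true) := by
        by_cases hb : PySem.Str.strip l = ""
        · have hss : PySem.Str.startswith "" "#" = false := by decide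
          simp only [pvStepA, hb, hss, Bool.false_eq_true, if_false, if_true]
        · simp only [pvStepA, hc, Bool.false_eq_true, if_false, hb, Bool.or_true, if_true]
      rw [h1, ih, hkeep, if_pos rfl, List.append_assoc]
      rfl

-- before the function starts, A's scan classifies like B's prefix pass
set_option maxHeartbeats 1000000 in
lemma loopA_false (fn : String) :
    ∀ (lines : List String) (ex hd bd : List String),
      ∃ b : Bool,
        lines.foldl (pvStepA fn) (ex, hd, bd, false) =
          (((lines.take (lines.findIdx (pvPredB fn))).foldl pvClsB (ex, hd)).1,
           ((lines.take (lines.findIdx (pvPredB fn))).foldl pvClsB (ex, hd)).2,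
           bd ++ (lines.drop (lines.findIdx (pvPredB fn))).filter
                  (fun l => !(PySem.Str.startswith (PySem.Str.strip l) "#")),
           b) := by
  intro lines
  induction lines with
  | nil => intro ex hd bd; exact ⟨false, by simp⟩
  | cons l rest ih =>
    intro ex hd bd
    by_cases hp : pvPredB fn l = true
    · -- function starts here
      have hc : PySem.Str.startswith (PySem.Str.strip l) "#" = false := by
        unfold pvPredB at hp
        simp only [Bool.and_eq_true, Bool.not_eq_true'] at hp
        exact hp.1.1.1
      have hparen : PySem.Str.isIn "(" l = true := by
        unfold pvPredB at hp
        simp only [Bool.and_eq_true] at hp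
        exact hp.2
      have hdet : (PySem.Str.isIn fn l && PySem.Str.isIn "{" l && PySem.Str.isIn "(" l) = true := by
        unfold pvPredB at hp
        simp only [Bool.and_eq_true] at hp
        rw [hp.1.1.2, hp.1.2, hp.2]
        rfl
      have hb := strip_ne_empty_of_paren hparen
      refine ⟨true, ?_⟩
      rw [List.findIdx_cons, hp]
      simp only [cond_true, List.take_zero, List.drop_zero, List.foldl_nil, List.foldl_cons]
      rw [List.filter_cons]
      simp only [hc, Bool.not_false]
      have hstep : pvStepA fn (ex, hd, bd, false) l = (ex, hd, bd ++ [l], true) := by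
        simp only [pvStepA, hc, Bool.false_eq_true, if_false, hb, hdet, Bool.or_false, if_true]
      rw [hstep, loopA_true]
      simp
    · -- still before the function
      have hp' : pvPredB fn l = false := by simpa using hp
      rw [List.findIdx_cons, hp']
      simp only [cond_false, List.take_succ_cons, List.drop_succ_cons, List.foldl_cons]
      by_cases hc : PySem.Str.startswith (PySem.Str.strip l) "#" = true
      · -- comment line: both skip
        have hstep : pvStepA fn (ex, hd, bd, false) l = (ex, hd, bd, false) := by
          simp only [pvStepA, hc, if_true]
        have hcls : pvClsB (ex, hd) l = (ex, hd) := by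
          simp only [pvClsB, hc, Bool.or_true, if_true]
        rw [hstep, hcls]
        exact ih ex hd bd
      · simp only [Bool.not_eq_true] at hc
        by_cases hb : PySem.Str.strip l = ""
        · -- blank line: both skip (not yet in the function)
          have hstep : pvStepA fn (ex, hd, bd, false) l = (ex, hd, bd, false) := by
            simp only [pvStepA, Bool.false_eq_true, if_false, hb, if_true, ite_self]
          have hcls : pvClsB (ex, hd) l = (ex, hd) := by
            simp only [pvClsB, hb, decide_true, Bool.true_or, if_true]
          rw [hstep, hcls]
          exact ih ex hd bd
        · -- ordinary line: identical classification chain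
          have hdet : (PySem.Str.isIn fn l && PySem.Str.isIn "{" l && PySem.Str.isIn "(" l) = false := by
            unfold pvPredB at hp'
            simp only [hc, Bool.not_false, Bool.true_and] at hp'
            simp only [Bool.and_eq_false_iff] at hp' ⊢
            tauto
          have hstep : pvStepA fn (ex, hd, bd, false) l = ((pvClsB (ex, hd) l).1, (pvClsB (ex, hd) l).2, bd, false) := by
            simp only [pvStepA, pvClsB, hc, Bool.false_eq_true, if_false, hb,
              decide_eq_true_eq, hdet, Bool.or_self, Bool.or_false]
            split_ifs <;> rfl
          rw [hstep]
          exact ih (pvClsB (ex, hd) l).1 (pvClsB (ex, hd) l).2 bd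

-- ===== VERDICT (by name: the statement is the Claim_ definition above) =====
theorem split_m2c_draft_py_spec : Claim_equal_split_m2c_draft_py := by
  intro c_code func_name _
  unfold Spec_split_m2c_draft_py split_m2c_draft_py split_m2c_draft_py_alt
  obtain ⟨b, hb⟩ := loopA_false func_name (PySem.Str.splitlines c_code) [] [] []
  simp only [hb, List.nil_append]
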